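-- pv_equiv track=rewrite | github.com/zdzMorata/dingcan | dingcan/WEB-INF/classes/apriori_history.py | createCandidateSet
-- ===== SOURCE A (Python) =====
-- def createCandidateSet(dataSet):
--     result = []  # 存所有的 k-1 项集  （ 非频繁项集， 因为还没有通过最小支持度比较 ）  格式: [[1],[2],[3]]
--     for transaction in dataSet:  # 取出每条事务
--         for item in transaction: # 从事务中取出每个商品
--             if not [item] in result:
--                 result.append( [item] )  #  [ [1],[3],[4],[2],[5] ]
--     result.sort()
--     # 这里一定要用frozenset而不是set，因为以后要将这些集合作为字典键值使用，而字典的键必须是不可变的元素，而 []是可变的，所以要转换成 { } 才行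
--     return map( frozenset, result)
-- ===== SOURCE B (Python) =====
-- # B: flatten everything, sort once, single-pass adjacent dedup (sort-first O(M log M)
-- # instead of A's per-item membership scan); returns a map of frozensets like A.
-- def createCandidateSet(dataSet):
--     flat = []
--     for transaction in dataSet:
--         flat += transaction
--     flat.sort()
--     out = []
--     prev = None
--     for x in flat:
--         if x != prev:
--             out.append(x)
--             prev = x
--     return map(frozenset, ([x] for x in out))
-- ===== Notes on version B (the rewrite author's own statement) =====
-- stated objective: faster
-- what changed: Replaces A's per-item linear membership scan over the growing result list by flattening once, sorting once, and deduplicating adjacent equal items in a single linear pass.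
import Mathlib
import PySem

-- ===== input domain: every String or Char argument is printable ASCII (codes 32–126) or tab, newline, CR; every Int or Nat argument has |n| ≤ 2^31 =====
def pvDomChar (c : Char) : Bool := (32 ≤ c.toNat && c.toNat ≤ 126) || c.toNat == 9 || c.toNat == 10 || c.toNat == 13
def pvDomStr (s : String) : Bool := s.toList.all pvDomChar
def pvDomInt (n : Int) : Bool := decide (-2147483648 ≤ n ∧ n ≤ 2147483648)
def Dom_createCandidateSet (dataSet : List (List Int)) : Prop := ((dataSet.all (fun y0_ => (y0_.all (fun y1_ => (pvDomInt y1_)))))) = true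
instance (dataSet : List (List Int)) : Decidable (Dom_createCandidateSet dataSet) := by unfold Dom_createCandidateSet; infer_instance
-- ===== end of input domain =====

-- B flattens once, sorts once and removes adjacent duplicates in one pass, instead of
-- A's per-item membership scan over the growing result list; return values proved equal.


-- ===== PORT A =====
def createCandidateSet (dataSet : List (List Int)) : List (List Int) :=
  let result : List (List Int) := dataSet.foldl
    (fun r transaction => transaction.foldl
      (fun r item => if [item] ∈ r then r else r ++ [[item]]) r) []
  -- result.sort(); return map(frozenset, result)
  (PySem.List.sorted result (fun x => x) false).map (fun fs => PySem.Set.ofList fs)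

-- ===== PORT B =====
def createCandidateSet_alt (dataSet : List (List Int)) : List (List Int) :=
  let flat : List Int := dataSet.foldl (fun acc transaction => acc ++ transaction) []
  let sortedFlat := PySem.List.sorted flat (fun x => x) false
  let st := sortedFlat.foldl
    (fun (s : List Int × Option Int) x =>
      if some x ≠ s.2 then (s.1 ++ [x], some x) else s) ([], none)
  st.1.map (fun x => PySem.Set.ofList [x])

-- ===== PRECONDITION & SPEC =====
def Spec_createCandidateSet (dataSet : List (List Int)) (out : List (List Int)) : Prop := out = createCandidateSet_alt dataSet
instance (dataSet : List (List Int)) (out : List (List Int)) : Decidable (Spec_createCandidateSet dataSet out) := by unfold Spec_createCandidateSet; infer_instance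

-- ===== CLAIM (what is proved, stated in full; the proofs are below) =====
def Claim_equal_createCandidateSet : Prop := ∀ (dataSet : List (List Int)), Dom_createCandidateSet dataSet → Spec_createCandidateSet dataSet (createCandidateSet dataSet)

-- ===== LEMMAS AND PROOFS =====

-- adjacent-dedup of B's loop, with the running "previous" value
def daDedup : Option Int → List Int → List Int
  | _, [] => []
  | p, x :: t => if some x ≠ p then x :: daDedup (some x) t else daDedup p t

-- A's nested loop is the same fold over the flattened list
lemma foldl_nested_eq_flatten (dataSet : List (List Int))
    (f : List (List Int) → Int → List (List Int)) (acc : List (List Int)) :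
    dataSet.foldl (fun r t => t.foldl f r) acc = dataSet.flatten.foldl f acc := by
  induction dataSet generalizing acc with
  | nil => rfl
  | cons t rest ih => simp [List.foldl_append, ih]

-- A's membership-scan loop over singletons is Set.ofList's fold, mapped through [·]
lemma foldl_singleton_eq_add (l : List Int) (acc : List Int) :
    l.foldl (fun r a => if [a] ∈ r then r else r ++ [[a]]) (acc.map (fun x => [x]))
      = (l.foldl PySem.Set.add acc).map (fun x => [x]) := by
  induction l generalizing acc with
  | nil => rfl
  | cons a t ih =>
    have hmem : ([a] ∈ acc.map (fun x => [x])) ↔ a ∈ acc := by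
      simp
    have hcont : (PySem.Set.add acc a) = if a ∈ acc then acc else acc ++ [a] := by
      simp [PySem.Set.add, List.contains_eq_mem]
    by_cases h : a ∈ acc
    · simp only [List.foldl_cons, hcont, if_pos (hmem.mpr h), if_pos h, ih]
    · simp only [List.foldl_cons, hcont, if_neg (fun hx => h (hmem.mp hx)), if_neg h]
      rw [show (acc.map (fun x => [x]) ++ [[a]]) = (acc ++ [a]).map (fun x => [x]) by simp]
      exact ih (acc ++ [a])

-- singleton lists compare exactly like their elements
lemma singleton_lt_iff (a b : Int) : ([a] < ([b] : List Int)) ↔ a < b := by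
  constructor
  · intro h
    cases h with
    | cons h => cases h
    | rel h => exact h
  · intro h
    exact List.Lex.rel h

lemma insertBy_map_singleton (x : Int) (ys : List Int) :
    PySem.List.insertBy (fun a b : List Int => decide (a < b)) [x] (ys.map (fun v => [v]))
      = (PySem.List.insertBy (fun a b : Int => decide (a < b)) x ys).map (fun v => [v]) := by
  induction ys with
  | nil => rfl
  | cons y t ih =>
    have hd : decide (([x] : List Int) < [y]) = decide (x < y) :=
      decide_eq_decide.mpr (singleton_lt_iff x y)
    by_cases h : x < y
    · simp [PySem.List.insertBy, hd, h]
    · simp [PySem.List.insertBy, hd, h, ih]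

-- sorting commutes with wrapping every element as a singleton list
lemma sorted_map_singleton (X : List Int) :
    PySem.List.sorted (X.map (fun v => [v])) (fun x => x) false
      = (PySem.List.sorted X (fun x => x) false).map (fun v => [v]) := by
  rw [PySem.List.sorted_eq_foldl_insertBy, PySem.List.sorted_eq_foldl_insertBy]
  suffices h : ∀ (accZ : List Int),
      (X.map (fun v => [v])).foldl
        (fun acc x => PySem.List.insertBy (fun a b : List Int => decide (a < b)) x acc)
        (accZ.map (fun v => [v]))
      = (X.foldl (fun acc x => PySem.List.insertBy (fun a b : Int => decide (a < b)) x acc) accZ).map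
          (fun v => [v]) by
    simpa using h []
  induction X with
  | nil => intro accZ; rfl
  | cons x t ih =>
    intro accZ
    simp only [List.map_cons, List.foldl_cons]
    rw [insertBy_map_singleton, ih]

-- B's fold appends exactly the adjacent-dedup of the remaining list
lemma foldl_dedup_eq_da (l : List Int) (out : List Int) (p : Option Int) :
    (l.foldl (fun (s : List Int × Option Int) x =>
        if some x ≠ s.2 then (s.1 ++ [x], some x) else s) (out, p)).1
      = out ++ daDedup p l := by
  induction l generalizing out p with
  | nil => simp [daDedup]
  | cons x t ih =>
    rw [List.foldl_cons]
    by_cases h : some x = p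
    · rw [show (if some x ≠ (out, p).2 then ((out, p).1 ++ [x], some x) else (out, p)) = (out, p)
            from if_neg (by simp [h]),
          ih, daDedup, if_neg (by simp [h])]
    · rw [show (if some x ≠ (out, p).2 then ((out, p).1 ++ [x], some x) else (out, p))
            = (out ++ [x], some x) from if_pos (by simpa using h),
          ih, daDedup, if_pos (by simpa using h)]
      simp

lemma daDedup_skip (x : Int) (t : List Int) (p : Option Int) (h : some x = p) :
    daDedup p (x :: t) = daDedup p t := by
  rw [daDedup, if_neg (by simp [h])]

lemma daDedup_keep (x : Int) (t : List Int) (p : Option Int) (h : ¬ some x = p) :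
    daDedup p (x :: t) = x :: daDedup (some x) t := by
  rw [daDedup, if_pos (by simpa using h)]

lemma mem_daDedup (l : List Int) (p : Option Int) (z : Int) (hz : z ∈ daDedup p l) : z ∈ l := by
  induction l generalizing p with
  | nil => simp [daDedup] at hz
  | cons x t ih =>
    by_cases h : some x = p
    · rw [daDedup_skip x t p h] at hz
      exact List.mem_cons_of_mem _ (ih p hz)
    · rw [daDedup_keep x t p h] at hz
      rcases List.mem_cons.mp hz with rfl | hz
      · exact List.mem_cons_self
      · exact List.mem_cons_of_mem _ (ih (some x) hz)

lemma daDedup_gt (l : List Int) (q : Int) (hp : l.Pairwise (· ≤ ·)) (hq : ∀ y ∈ l, q ≤ y) :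
    ∀ z ∈ daDedup (some q) l, q < z := by
  induction l generalizing q with
  | nil => intro z hz; simp [daDedup] at hz
  | cons x t ih =>
    intro z hz
    rcases List.pairwise_cons.mp hp with ⟨hxt, hpt⟩
    by_cases h : x = q
    · rw [daDedup_skip x t (some q) (by rw [h])] at hz
      subst h
      exact ih x hpt hxt z hz
    · have hqx : q < x := lt_of_le_of_ne (hq x List.mem_cons_self) (fun e => h e.symm)
      rw [daDedup_keep x t (some q) (fun e => h (Option.some.inj e))] at hz
      rcases List.mem_cons.mp hz with rfl | hz
      · exact hqx
      · exact lt_trans hqx (ih x hpt hxt z hz)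

lemma daDedup_pairwise (l : List Int) (p : Option Int) (hp : l.Pairwise (· ≤ ·)) :
    (daDedup p l).Pairwise (· < ·) := by
  induction l generalizing p with
  | nil => simp [daDedup]
  | cons x t ih =>
    rcases List.pairwise_cons.mp hp with ⟨hxt, hpt⟩
    by_cases h : some x = p
    · rw [daDedup_skip x t p h]; exact ih p hpt
    · rw [daDedup_keep x t p h]
      exact List.pairwise_cons.mpr ⟨daDedup_gt t x hpt hxt, ih (some x) hpt⟩

lemma mem_daDedup_of_mem_ne (l : List Int) (q : Int) (hp : l.Pairwise (· ≤ ·))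
    (hq : ∀ y ∈ l, q ≤ y) : ∀ z ∈ l, z ≠ q → z ∈ daDedup (some q) l := by
  induction l generalizing q with
  | nil => intro z hz; simp at hz
  | cons x t ih =>
    intro z hz hzq
    rcases List.pairwise_cons.mp hp with ⟨hxt, hpt⟩
    by_cases h : x = q
    · rw [daDedup_skip x t (some q) (by rw [h])]
      subst h
      rcases List.mem_cons.mp hz with rfl | hz
      · exact absurd rfl hzq
      · exact ih x hpt hxt z hz hzq
    · rw [daDedup_keep x t (some q) (fun e => h (Option.some.inj e))]
      rcases List.mem_cons.mp hz with rfl | hz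
      · exact List.mem_cons_self
      · by_cases hzx : z = x
        · subst hzx; exact List.mem_cons_self
        · exact List.mem_cons_of_mem _ (ih x hpt hxt z hz hzx)

lemma mem_daDedup_none (l : List Int) (hp : l.Pairwise (· ≤ ·)) :
    ∀ z ∈ l, z ∈ daDedup none l := by
  cases l with
  | nil => intro z hz; simp at hz
  | cons x t =>
    intro z hz
    rcases List.pairwise_cons.mp hp with ⟨hxt, hpt⟩
    rw [daDedup_keep x t none (by simp)]
    rcases List.mem_cons.mp hz with rfl | hz
    · exact List.mem_cons_self
    · by_cases hzx : z = x
      · subst hzx; exact List.mem_cons_self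
      · exact List.mem_cons_of_mem _ (mem_daDedup_of_mem_ne t x hpt hxt z hz hzx)

-- the bridge: sorting the first-occurrence dedup IS the adjacent-dedup of the sorted list
lemma sorted_ofList_eq_daDedup_sorted (flat : List Int) :
    PySem.List.sorted (PySem.Set.ofList flat) (fun x => x) false
      = daDedup none (PySem.List.sorted flat (fun x => x) false) := by
  set sl := PySem.List.sorted flat (fun x => x) false with hsl
  have hslp : sl.Pairwise (· ≤ ·) := by
    simpa using PySem.List.sorted_pairwise flat (fun x => x)
  have hpw : (daDedup none sl).Pairwise (· < ·) := daDedup_pairwise sl none hslp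
  have hnd : (daDedup none sl).Nodup := List.Pairwise.imp (fun h => ne_of_lt h) hpw
  have hmem : ∀ z, z ∈ daDedup none sl ↔ z ∈ PySem.Set.ofList flat := by
    intro z
    rw [PySem.Set.mem_ofList]
    constructor
    · intro h
      have := mem_daDedup sl none z h
      rw [hsl, PySem.List.mem_sorted] at this
      exact this
    · intro h
      exact mem_daDedup_none sl hslp z (by rw [hsl, PySem.List.mem_sorted]; exact h)
  have hperm : (daDedup none sl).Perm (PySem.Set.ofList flat) :=
    (List.perm_ext_iff_of_nodup hnd (PySem.Set.nodup_ofList flat)).mpr hmem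
  exact PySem.List.sorted_eq_of_perm_of_pairwise_lt _ _ _ hperm hpw

lemma set_ofList_singleton (x : Int) : PySem.Set.ofList [x] = [x] := by
  simp [PySem.Set.ofList, PySem.Set.add, PySem.Set.empty]

-- ===== VERDICT (by name: the statement is the Claim_ definition above) =====
theorem createCandidateSet_spec : Claim_equal_createCandidateSet := by
  intro dataSet _
  unfold Spec_createCandidateSet createCandidateSet createCandidateSet_alt
  simp only []
  have hflat : dataSet.foldl (fun acc t => acc ++ t) [] = dataSet.flatten := by
    simpa using PySem.List.foldl_append_eq_flatten (xs := dataSet) (acc := [])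
  rw [hflat]
  rw [foldl_nested_eq_flatten]
  have hres : dataSet.flatten.foldl
      (fun r item => if [item] ∈ r then r else r ++ [[item]]) ([] : List (List Int))
      = (PySem.Set.ofList dataSet.flatten).map (fun x => [x]) := by
    have := foldl_singleton_eq_add dataSet.flatten []
    simpa [PySem.Set.ofList, PySem.Set.empty] using this
  rw [hres, sorted_map_singleton, sorted_ofList_eq_daDedup_sorted,
      foldl_dedup_eq_da]
  simp [set_ofList_singleton]
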